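-- pv_equiv track=rewrite | github.com/dturner3282-commits/AuRa | android/engine.py | decode_timeline
-- ===== SOURCE A (Python) =====
-- def decode_timeline(timeline, freq_map, tolerance=30):
--     """Map each frequency in timeline to nearest letter."""
--     decoded = []
--     for t, freq, mag in timeline:
--         best_letter = None
--         best_dist = tolerance
--         for mf, letter in freq_map.items():
--             d = abs(freq - mf)
--             if d < best_dist:
--                 best_dist = d
--                 best_letter = letter
--         if best_letter:
--             decoded.append((t, best_letter, freq))
--     return decoded
-- ===== SOURCE B (Python) =====
-- def decode_timeline(timeline, freq_map, tolerance=30):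
--     """Map each frequency in timeline to nearest letter (sorted table + binary search)."""
--     items = sorted(((mf, i, letter) for i, (mf, letter) in enumerate(freq_map.items())),
--                    key=lambda it: it[0])
--     keys = [it[0] for it in items]
--     decoded = []
--     for t, freq, mag in timeline:
--         # bisect_left(keys, freq)
--         lo, hi = 0, len(keys)
--         while lo < hi:
--             mid = (lo + hi) // 2
--             if keys[mid] < freq:
--                 lo = mid + 1
--             else:
--                 hi = mid
--         best = None
--         if lo < len(items):
--             mf, i, letter = items[lo]          # keys[lo] >= freq
--             best = (mf - freq, i, letter)
--         if lo > 0: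
--             mf, i, letter = items[lo - 1]      # keys[lo-1] < freq
--             cand = (freq - mf, i, letter)
--             if best is None or (cand[0], cand[1]) < (best[0], best[1]):
--                 best = cand
--         if best is not None and best[0] < tolerance and best[2]:
--             decoded.append((t, best[2], freq))
--     return decoded
-- ===== Notes on version B (the rewrite author's own statement) =====
-- stated objective: faster
-- what changed: Replaces the per-entry linear scan of freq_map with a one-time sort of the frequency keys plus a binary search per timeline entry for the two nearest neighbours, resolving equidistant ties by dict-insertion index.
import Mathlib
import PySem

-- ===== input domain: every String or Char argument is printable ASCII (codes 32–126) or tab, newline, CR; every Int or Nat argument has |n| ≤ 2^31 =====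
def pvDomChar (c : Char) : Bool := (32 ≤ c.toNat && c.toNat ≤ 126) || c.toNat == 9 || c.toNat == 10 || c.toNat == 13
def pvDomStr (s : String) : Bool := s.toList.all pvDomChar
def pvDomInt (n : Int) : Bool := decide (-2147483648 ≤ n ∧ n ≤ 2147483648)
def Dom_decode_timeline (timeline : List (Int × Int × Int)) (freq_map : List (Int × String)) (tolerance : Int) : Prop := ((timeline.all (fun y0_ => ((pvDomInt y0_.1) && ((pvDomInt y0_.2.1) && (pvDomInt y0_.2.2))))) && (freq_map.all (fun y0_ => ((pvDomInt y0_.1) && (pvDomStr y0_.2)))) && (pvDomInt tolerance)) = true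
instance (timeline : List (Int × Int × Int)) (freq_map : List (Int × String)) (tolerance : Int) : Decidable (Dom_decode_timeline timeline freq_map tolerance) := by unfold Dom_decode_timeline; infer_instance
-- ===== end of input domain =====

-- B replaces A's per-entry linear scan of freq_map by a one-time sort of the keys plus a
-- binary search per timeline entry for the two nearest neighbours (objective: faster).

-- ===== PORT A =====
-- the inner 'for mf, letter in freq_map.items(): …' loop body
def pvStepA (freq : Int) (st : Option String × Int) (p : Int × String) : Option String × Int :=
  let d := |freq - p.1|
  if d < st.2 then (some p.2, d) else st

def decode_timeline (timeline : List (Int × Int × Int)) (freq_map : List (Int × String)) (tolerance : Int) : List (Int × String × Int) :=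
  let fm := (PySem.Dict.ofList freq_map).items
  timeline.foldl (fun decoded e =>
    let r := fm.foldl (pvStepA e.2.1) (none, tolerance)
    match r.1 with
    | some letter => if letter ≠ "" then decoded ++ [(e.1, letter, e.2.1)] else decoded
    | none => decoded) []

-- ===== PORT B =====
-- '(cand[0], cand[1]) < (best[0], best[1])' : Python's lexicographic tuple comparison
def pvCandLt (c b : Int × Int × String) : Bool :=
  c.1 < b.1 || (c.1 == b.1 && c.2.1 < b.2.1)

-- per-entry body of Source B: its hand-written 'while lo < hi' halving loop is exactly
-- bisect_left, ported as PySem.List.bisectLeft (the same lo/hi loop); then the two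
-- neighbour candidates items[lo] / items[lo-1]
def pvBestB (items : List (Int × Int × String)) (keys : List Int) (freq : Int) :
    Option (Int × Int × String) :=
  let lo := PySem.List.bisectLeft keys freq
  let best0 : Option (Int × Int × String) :=
    match items[lo]? with
    | some it => some (it.1 - freq, it.2.1, it.2.2)
    | none => none
  if lo > 0 then
    match items[lo - 1]? with
    | some it =>
      let cand := (freq - it.1, it.2.1, it.2.2)
      match best0 with
      | none => some cand
      | some b => if pvCandLt cand b then some cand else some b
    | none => best0
  else best0

def decode_timeline_alt (timeline : List (Int × Int × Int)) (freq_map : List (Int × String)) (tolerance : Int) : List (Int × String × Int) :=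
  let items := PySem.List.sorted
    ((PySem.List.enumerate (PySem.Dict.ofList freq_map).items).map (fun p => (p.2.1, p.1, p.2.2)))
    (fun it => it.1)
  let keys := items.map (fun it => it.1)
  timeline.foldl (fun decoded e =>
    match pvBestB items keys e.2.1 with
    | some b => if b.1 < tolerance ∧ b.2.2 ≠ "" then decoded ++ [(e.1, b.2.2, e.2.1)] else decoded
    | none => decoded) []

-- ===== PRECONDITION & SPEC =====
def Spec_decode_timeline (timeline : List (Int × Int × Int)) (freq_map : List (Int × String)) (tolerance : Int) (out : List (Int × String × Int)) : Prop := out = decode_timeline_alt timeline freq_map tolerance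
instance (timeline : List (Int × Int × Int)) (freq_map : List (Int × String)) (tolerance : Int) (out : List (Int × String × Int)) : Decidable (Spec_decode_timeline timeline freq_map tolerance out) := by unfold Spec_decode_timeline; infer_instance

-- ===== CLAIM (what is proved, stated in full; the proofs are below) =====
def Claim_equal_decode_timeline : Prop := ∀ (timeline : List (Int × Int × Int)) (freq_map : List (Int × String)) (tolerance : Int), Dom_decode_timeline timeline freq_map tolerance → Spec_decode_timeline timeline freq_map tolerance (decode_timeline timeline freq_map tolerance)

-- ===== LEMMAS AND PROOFS =====

-- the candidate a freq_map item (mf, i, letter) contributes for frequency `freq`: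
-- (distance, insertion index, letter)
def pvCand (freq : Int) (it : Int × Int × String) : Int × Int × String :=
  (|freq - it.1|, it.2.1, it.2.2)

-- reference fold: running minimum of (distance, index), threshold t, first winner kept
def pvG (t : Int) (acc : Option (Int × Int × String)) (c : Int × Int × String) :
    Option (Int × Int × String) :=
  match acc with
  | none => if c.1 < t then some c else none
  | some b => if c.1 < b.1 then some c else some b

-- relation between A's loop state and the reference fold's state
def pvR (t : Int) (st : Option String × Int) (acc : Option (Int × Int × String)) : Prop :=
  (acc = none ∧ st = (none, t)) ∨ (∃ c, acc = some c ∧ st = (some c.2.2, c.1))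

-- A's inner loop, viewed over the enumerated items, simulates the reference fold
theorem pvA_sim (freq t : Int) (E : List (Int × (Int × String)))
    (st : Option String × Int) (acc : Option (Int × Int × String)) (h : pvR t st acc) :
    pvR t (E.foldl (fun st p => pvStepA freq st p.2) st)
      ((E.map (fun p => pvCand freq (p.2.1, p.1, p.2.2))).foldl (pvG t) acc) := by
  induction E generalizing st acc with
  | nil => simpa using h
  | cons p E ih =>
    simp only [List.foldl_cons, List.map_cons]
    apply ih
    rcases h with ⟨hacc, hst⟩ | ⟨c, hacc, hst⟩
    · subst hacc; subst hst
      simp only [pvStepA, pvG, pvCand]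
      split_ifs with h1
      · exact Or.inr ⟨_, rfl, rfl⟩
      · exact Or.inl ⟨rfl, rfl⟩
    · subst hacc; subst hst
      simp only [pvStepA, pvG, pvCand]
      split_ifs with h1
      · exact Or.inr ⟨_, rfl, rfl⟩
      · exact Or.inr ⟨c, rfl, rfl⟩

-- characterizations of the reference fold
theorem pvG_none (t : Int) (cm : List (Int × Int × String))
    (h : cm.foldl (pvG t) none = none) : ∀ c ∈ cm, t ≤ c.1 := by
  induction cm using List.reverseRecOn with
  | nil => simp
  | append_singleton cm x ih =>
    rw [List.foldl_append, List.foldl_cons, List.foldl_nil] at h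
    match hr : cm.foldl (pvG t) none with
    | none =>
      rw [hr] at h
      simp only [pvG] at h
      split_ifs at h with h1
      intro c hc
      rcases List.mem_append.1 hc with hc | hc
      · exact ih hr c hc
      · simp at hc; subst hc; omega
    | some b => rw [hr] at h; simp only [pvG] at h; split_ifs at h

theorem pvG_some (t : Int) (cm : List (Int × Int × String))
    (hinc : cm.Pairwise (fun a b => a.2.1 < b.2.1))
    (c : Int × Int × String) (h : cm.foldl (pvG t) none = some c) :
    c ∈ cm ∧ c.1 < t ∧ ∀ c' ∈ cm, c.1 < c'.1 ∨ (c.1 = c'.1 ∧ c.2.1 ≤ c'.2.1) := by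
  induction cm using List.reverseRecOn generalizing c with
  | nil => simp at h
  | append_singleton cm x ih =>
    rw [List.foldl_append, List.foldl_cons, List.foldl_nil] at h
    have hinc' : cm.Pairwise (fun a b => a.2.1 < b.2.1) :=
      hinc.sublist (List.sublist_append_left _ _)
    match hr : cm.foldl (pvG t) none with
    | none =>
      rw [hr] at h
      have hall := pvG_none t cm hr
      simp only [pvG] at h
      split_ifs at h with h1
      · cases h
        refine ⟨List.mem_append_right _ (by simp), h1, ?_⟩
        intro c' hc'
        rcases List.mem_append.1 hc' with hc' | hc'
        · exact Or.inl (lt_of_lt_of_le h1 (hall c' hc'))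
        · simp at hc'; subst hc'; exact Or.inr ⟨rfl, le_refl _⟩
    | some b =>
      rw [hr] at h
      obtain ⟨hbmem, hbt, hblex⟩ := ih hinc' b hr
      simp only [pvG] at h
      split_ifs at h with h1
      · cases h
        refine ⟨List.mem_append_right _ (by simp), lt_trans h1 hbt, ?_⟩
        intro c' hc'
        rcases List.mem_append.1 hc' with hc' | hc'
        · rcases hblex c' hc' with h2 | ⟨h2, _⟩
          · exact Or.inl (lt_trans h1 h2)
          · exact Or.inl (h2 ▸ h1)
        · simp at hc'; subst hc'; exact Or.inr ⟨rfl, le_refl _⟩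
      · cases h
        refine ⟨List.mem_append_left _ hbmem, hbt, ?_⟩
        intro c' hc'
        rcases List.mem_append.1 hc' with hc' | hc'
        · exact hblex c' hc'
        · simp at hc'; subst hc'
          rcases lt_or_eq_of_le (not_lt.1 h1) with h2 | h2
          · exact Or.inl h2
          · refine Or.inr ⟨h2, le_of_lt ?_⟩
            have := List.pairwise_append.1 hinc
            exact this.2.2 c hbmem _ (by simp)

-- characterizations of B's neighbour choice on a strictly key-sorted items list
theorem pvB_none (S : List (Int × Int × String)) (freq : Int)
    (hs : (S.map (fun it => it.1)).Pairwise (· < ·))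
    (h : pvBestB S (S.map (fun it => it.1)) freq = none) : S = [] := by
  by_contra hne
  have hlen : 0 < S.length := List.length_pos_iff.2 hne
  obtain ⟨hle, _, _⟩ := PySem.List.bisectLeft_spec (S.map (fun it => it.1)) freq
    (hs.imp le_of_lt)
  rw [List.length_map] at hle
  simp only [pvBestB] at h
  set lo := PySem.List.bisectLeft (S.map (fun it => it.1)) freq with hlo
  by_cases h1 : lo < S.length
  · rw [List.getElem?_eq_getElem h1] at h
    by_cases h0 : 0 < lo
    · rw [if_pos h0, List.getElem?_eq_getElem (show lo - 1 < S.length by omega)] at h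
      simp only at h
      split_ifs at h
    · rw [if_neg h0] at h; simp at h
  · have h0 : 0 < lo := by omega
    rw [if_pos h0, List.getElem?_eq_getElem (show lo - 1 < S.length by omega),
      List.getElem?_eq_none (show S.length ≤ lo by omega)] at h
    simp at h

theorem pvB_some (S : List (Int × Int × String)) (freq : Int)
    (hs : (S.map (fun it => it.1)).Pairwise (· < ·))
    (b : Int × Int × String) (h : pvBestB S (S.map (fun it => it.1)) freq = some b) :
    b ∈ S.map (pvCand freq) ∧ ∀ c' ∈ S.map (pvCand freq),
      b.1 < c'.1 ∨ (b.1 = c'.1 ∧ b.2.1 ≤ c'.2.1) := by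
  obtain ⟨hle, hlt, hge⟩ := PySem.List.bisectLeft_spec (S.map (fun it => it.1)) freq
    (hs.imp le_of_lt)
  rw [List.length_map] at hle
  simp only [pvBestB] at h
  set lo := PySem.List.bisectLeft (S.map (fun it => it.1)) freq with hlo
  have klt : ∀ (j : Nat) (hj : j < S.length), j < lo → S[j].1 < freq := by
    intro j hj hjlo
    have := hlt j (by simpa using hj) hjlo
    simpa using this
  have kge : ∀ (j : Nat) (hj : j < S.length), lo ≤ j → freq ≤ S[j].1 := by
    intro j hj hjlo
    have := hge j (by simpa using hj) hjlo
    simpa using this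
  have kmono : ∀ (p q : Nat) (hp : p < S.length) (hq : q < S.length), p < q → S[p].1 < S[q].1 := by
    intro p q hp hq hpq
    have := (List.pairwise_iff_getElem.1 hs) p q (by simpa using hp) (by simpa using hq) hpq
    simpa using this
  have habs_ge : ∀ (j : Nat) (hj : j < S.length), lo ≤ j → |freq - S[j].1| = S[j].1 - freq := by
    intro j hj hjlo
    have h1 := kge j hj hjlo
    have := abs_of_nonpos (show freq - S[j].1 ≤ 0 by omega)
    omega
  have habs_lt : ∀ (j : Nat) (hj : j < S.length), j < lo → |freq - S[j].1| = freq - S[j].1 := by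
    intro j hj hjlo
    have h1 := klt j hj hjlo
    have := abs_of_nonneg (show (0:Int) ≤ freq - S[j].1 by omega)
    omega
  have hmem : ∀ (j : Nat) (hj : j < S.length), pvCand freq S[j] ∈ S.map (pvCand freq) := by
    intro j hj
    exact List.mem_map.2 ⟨S[j], List.getElem_mem hj, rfl⟩
  have hquant : ∀ (bb : Int × Int × String), (∀ (j : Nat) (hj : j < S.length),
        bb.1 < |freq - S[j].1| ∨ (bb.1 = |freq - S[j].1| ∧ bb.2.1 ≤ S[j].2.1)) →
      ∀ c' ∈ S.map (pvCand freq), bb.1 < c'.1 ∨ (bb.1 = c'.1 ∧ bb.2.1 ≤ c'.2.1) := by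
    intro bb hj c' hc'
    obtain ⟨it, hit, rfl⟩ := List.mem_map.1 hc'
    obtain ⟨j, hjl, rfl⟩ := List.mem_iff_getElem.1 hit
    exact hj j hjl
  by_cases h1 : lo < S.length
  · have hDlo : |freq - S[lo].1| = S[lo].1 - freq := habs_ge lo h1 (le_refl _)
    rw [List.getElem?_eq_getElem h1] at h
    by_cases h0 : 0 < lo
    · -- both candidates
      have h2 : lo - 1 < S.length := by omega
      have hDlo1 : |freq - S[lo-1].1| = freq - S[lo-1].1 := habs_lt (lo-1) h2 (by omega)
      rw [if_pos h0, List.getElem?_eq_getElem h2] at h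
      simp only at h
      have main : ∀ (bb : Int × Int × String),
          (bb = pvCand freq S[lo-1] ∨ bb = pvCand freq S[lo]) →
          (bb.1 ≤ freq - S[lo-1].1) → (bb.1 ≤ S[lo].1 - freq) →
          (bb.1 = freq - S[lo-1].1 → bb.2.1 ≤ S[lo-1].2.1) →
          (bb.1 = S[lo].1 - freq → bb.2.1 ≤ S[lo].2.1) →
          bb ∈ S.map (pvCand freq) ∧ ∀ c' ∈ S.map (pvCand freq),
            bb.1 < c'.1 ∨ (bb.1 = c'.1 ∧ bb.2.1 ≤ c'.2.1) := by
        intro bb hbb hc1 hc2 ht1 ht2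
        refine ⟨by rcases hbb with rfl | rfl; exacts [hmem _ h2, hmem _ h1], ?_⟩
        apply hquant
        intro j hj
        by_cases hcase : j < lo
        · rcases eq_or_lt_of_le (show j ≤ lo - 1 by omega) with heq | hlt2
          · subst heq
            rw [hDlo1]
            rcases lt_or_eq_of_le hc1 with hx | hx
            · exact Or.inl hx
            · exact Or.inr ⟨hx, ht1 hx⟩
          · rw [habs_lt j hj hcase]
            have := kmono j (lo-1) (by omega) h2 (by omega)
            exact Or.inl (by omega)
        · rcases eq_or_lt_of_le (show lo ≤ j by omega) with heq | hlt2
          · subst heq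
            rw [hDlo]
            rcases lt_or_eq_of_le hc2 with hx | hx
            · exact Or.inl hx
            · exact Or.inr ⟨hx, ht2 hx⟩
          · rw [habs_ge j hj (by omega)]
            have := kmono lo j h1 hj hlt2
            exact Or.inl (by omega)
      split_ifs at h with hw
      · cases h
        simp only [pvCandLt, decide_eq_true_eq, Bool.or_eq_true, Bool.and_eq_true,
          beq_iff_eq, decide_eq_true_eq] at hw
        apply main _ (Or.inl (by simp only [pvCand]; rw [hDlo1]))
        · exact le_refl _
        · simp only
          rcases hw with hw | ⟨hw, _⟩ <;> omega
        · intro _; exact le_refl _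
        · intro hx
          simp only at hx ⊢
          rcases hw with hw | ⟨hw, hw2⟩
          · omega
          · exact le_of_lt hw2
      · cases h
        simp only [pvCandLt, decide_eq_true_eq, Bool.or_eq_true, Bool.and_eq_true,
          beq_iff_eq, decide_eq_true_eq, not_or, not_and, not_lt] at hw
        obtain ⟨hw1, hw2⟩ := hw
        apply main _ (Or.inr (by simp only [pvCand]; rw [hDlo]))
        · exact hw1
        · exact le_refl _
        · intro hx
          simp only at hx ⊢
          exact hw2 (by omega)
        · intro _; exact le_refl _
    · -- only the right candidate
      rw [if_neg h0] at h
      simp only at h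
      cases h
      refine ⟨by rw [show (S[lo].1 - freq, S[lo].2.1, S[lo].2.2) = pvCand freq S[lo] by
          simp only [pvCand]; rw [hDlo]]; exact hmem _ h1, ?_⟩
      apply hquant
      intro j hj
      rcases eq_or_lt_of_le (show lo ≤ j by omega) with heq | hlt2
      · subst heq
        rw [hDlo]
        exact Or.inr ⟨rfl, le_refl _⟩
      · rw [habs_ge j hj (by omega)]
        have := kmono lo j h1 hj hlt2
        exact Or.inl (by omega)
  · -- lo = length: only the left candidate
    rw [List.getElem?_eq_none (show S.length ≤ lo by omega)] at h
    by_cases h0 : 0 < lo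
    · have h2 : lo - 1 < S.length := by omega
      have hDlo1 : |freq - S[lo-1].1| = freq - S[lo-1].1 := habs_lt (lo-1) h2 (by omega)
      rw [if_pos h0, List.getElem?_eq_getElem h2] at h
      simp only at h
      cases h
      refine ⟨by rw [show (freq - S[lo-1].1, S[lo-1].2.1, S[lo-1].2.2) = pvCand freq S[lo-1] by
          simp only [pvCand]; rw [hDlo1]]; exact hmem _ h2, ?_⟩
      apply hquant
      intro j hj
      rcases eq_or_lt_of_le (show j ≤ lo - 1 by omega) with heq | hlt2
      · subst heq
        rw [hDlo1]
        exact Or.inr ⟨rfl, le_refl _⟩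
      · rw [habs_lt j hj (by omega)]
        have := kmono j (lo-1) (by omega) h2 hlt2
        exact Or.inl (by omega)
    · rw [if_neg h0] at h
      simp only at h
      cases h

-- per-entry glue: A's inner-loop decision equals B's binary-search decision
theorem pvEntry_eq (freq_map : List (Int × String)) (freq t : Int) :
    (match ((PySem.Dict.ofList freq_map).items.foldl (pvStepA freq) (none, t)).1 with
      | some letter => if letter ≠ "" then some letter else none
      | none => none)
    = (match pvBestB
          (PySem.List.sorted ((PySem.List.enumerate (PySem.Dict.ofList freq_map).items).map
            (fun p => (p.2.1, p.1, p.2.2))) (fun it => it.1))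
          ((PySem.List.sorted ((PySem.List.enumerate (PySem.Dict.ofList freq_map).items).map
            (fun p => (p.2.1, p.1, p.2.2))) (fun it => it.1)).map (fun it => it.1)) freq with
      | some b => if b.1 < t ∧ b.2.2 ≠ "" then some b.2.2 else none
      | none => none) := by
  set fm := (PySem.Dict.ofList freq_map).items with hfm
  set E := PySem.List.enumerate fm with hE
  set M := E.map (fun p => ((p.2.1 : Int), (p.1 : Int), p.2.2)) with hM
  set S := PySem.List.sorted M (fun it => it.1) with hS
  set CM := E.map (fun p => pvCand freq (p.2.1, p.1, p.2.2)) with hCM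
  have hperm : S.Perm M := PySem.List.sorted_perm M (fun it => it.1) false
  have hMkeys : M.map (fun it => it.1) = (PySem.Dict.ofList freq_map).keys := by
    rw [hM, List.map_map]
    have : fm.map (fun p => p.1) = (PySem.Dict.ofList freq_map).keys := rfl
    rw [← this, hE]
    rw [show ((fun (it : Int × Int × String) => it.1) ∘
        (fun (p : Int × (Int × String)) => ((p.2.1 : Int), (p.1 : Int), p.2.2)))
      = (fun (p : Int × (Int × String)) => p.2.1) from rfl]
    rw [show (fun (p : Int × (Int × String)) => p.2.1)
      = (fun (p : Int × String) => p.1) ∘ (fun (p : Int × (Int × String)) => p.2) from rfl]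
    rw [← List.map_map, PySem.List.map_snd_enumerate]
  have hnodupM : (M.map (fun it => it.1)).Nodup := by
    rw [hMkeys]; exact PySem.Dict.nodup_keys_ofList freq_map
  have hnodupS : (S.map (fun it => it.1)).Nodup :=
    (hperm.map _).nodup_iff.2 hnodupM
  have hsle : (S.map (fun it => it.1)).Pairwise (· ≤ ·) := by
    have := PySem.List.sorted_pairwise M (fun it => it.1)
    rw [← hS] at this
    exact List.pairwise_map.2 this
  have hs : (S.map (fun it => it.1)).Pairwise (· < ·) := by
    have := hsle.and hnodupS
    exact this.imp (fun h => lt_of_le_of_ne h.1 h.2)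
  have hinc : CM.Pairwise (fun a b => a.2.1 < b.2.1) := by
    have := PySem.List.pairwise_lt_enumerate fm 0
    rw [← hE] at this
    rw [hCM]
    exact List.pairwise_map.2 (this.imp (fun h => by simpa [pvCand] using h))
  have hfold : fm.foldl (pvStepA freq) (none, t) =
      E.foldl (fun st p => pvStepA freq st p.2) (none, t) := by
    conv_lhs => rw [← PySem.List.map_snd_enumerate fm 0, ← hE]
    rw [List.foldl_map]
  have hsim := pvA_sim freq t E (none, t) none (Or.inl ⟨rfl, rfl⟩)
  rw [← hCM] at hsim
  have hpermC : (S.map (pvCand freq)).Perm CM := by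
    have : CM = M.map (pvCand freq) := by
      rw [hCM, hM, List.map_map]; rfl
    rw [this]
    exact hperm.map _
  rcases hsim with ⟨hacc, hst⟩ | ⟨c, hacc, hst⟩
  · rw [hfold, hst]
    have hall := pvG_none t CM hacc
    match hB : pvBestB S (S.map (fun it => it.1)) freq with
    | none => rw [hB]
    | some b =>
      have hb := pvB_some S freq hs b hB
      have hbt : t ≤ b.1 := hall b (hpermC.mem_iff.1 hb.1)
      rw [hB]
      simp only
      rw [if_neg (by rintro ⟨h, -⟩; omega)]
  · rw [hfold, hst]
    obtain ⟨hcmem, hct, hclex⟩ := pvG_some t CM hinc c hacc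
    match hB : pvBestB S (S.map (fun it => it.1)) freq with
    | none =>
      exfalso
      have : S = [] := pvB_none S freq hs hB
      rw [this] at hpermC
      have : CM = [] := hpermC.symm.eq_nil
      rw [this] at hcmem
      exact absurd hcmem (List.not_mem_nil)
    | some b =>
      obtain ⟨hbmem, hblex⟩ := pvB_some S freq hs b hB
      have hbCM : b ∈ CM := hpermC.mem_iff.1 hbmem
      have hcS : c ∈ S.map (pvCand freq) := hpermC.mem_iff.2 hcmem
      have h1 := hclex b hbCM
      have h2 := hblex c hcS
      have hi : c.2.1 = b.2.1 := by
        rcases h1 with h | ⟨_, h⟩ <;> rcases h2 with h' | ⟨_, h'⟩ <;> omega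
      have hnodupI : (CM.map (fun x => x.2.1)).Nodup := by
        have : (CM.map (fun x => x.2.1)).Pairwise (· < ·) := List.pairwise_map.2 hinc
        exact this.imp ne_of_lt
      have hbc : b = c := List.inj_on_of_nodup_map hnodupI hbCM hcmem hi.symm
      rw [hbc] at hB
      rw [hB]
      simp only
      by_cases hne : c.2.2 = "" <;> simp [hne, hct]

-- rearranging the per-entry match through an Option value
theorem pvMatchA (r : Option String) (decoded : List (Int × String × Int)) (mk : String → Int × String × Int) :
    (match r with
      | some letter => if letter ≠ "" then decoded ++ [mk letter] else decoded
      | none => decoded)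
    = match (match r with
        | some letter => if letter ≠ "" then some letter else none
        | none => none) with
      | some l => decoded ++ [mk l]
      | none => decoded := by
  match r with
  | none => rfl
  | some letter => by_cases hne : letter = "" <;> simp [hne]

theorem pvMatchB (b : Option (Int × Int × String)) (t : Int)
    (decoded : List (Int × String × Int)) (mk : String → Int × String × Int) :
    (match b with
      | some b => if b.1 < t ∧ b.2.2 ≠ "" then decoded ++ [mk b.2.2] else decoded
      | none => decoded)
    = match (match b with
        | some b => if b.1 < t ∧ b.2.2 ≠ "" then some b.2.2 else none
        | none => none) with
      | some l => decoded ++ [mk l]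
      | none => decoded := by
  match b with
  | none => rfl
  | some bb => by_cases hc : bb.1 < t ∧ bb.2.2 ≠ "" <;> simp [hc]

-- ===== VERDICT (by name: the statement is the Claim_ definition above) =====
theorem decode_timeline_spec : Claim_equal_decode_timeline := by
  intro timeline freq_map tolerance _
  show decode_timeline timeline freq_map tolerance = decode_timeline_alt timeline freq_map tolerance
  simp only [decode_timeline, decode_timeline_alt]
  apply List.foldl_ext
  intro decoded e _
  rw [pvMatchA _ decoded (fun l => (e.1, l, e.2.1)),
    pvMatchB _ tolerance decoded (fun l => (e.1, l, e.2.1)),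
    pvEntry_eq freq_map e.2.1 tolerance]
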